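-- pv_equiv track=rewrite | github.com/MarizonCE/LQBPractice | 真题/填空题/5. 幸运数-循环.py | chk1
-- ===== SOURCE A (Python) =====
-- def chk1(x):
--     s = str(x)
--     n = len(s)
--     if n % 2 != 0:
--         return 0
--     sum_left = sum(int(c) for c in s[:n//2])
--     sum_right = sum(int(c) for c in s[n//2:])
--     return 1 if sum_left == sum_right else 0
-- ===== SOURCE B (Python) =====
-- def chk1(x):
--     s = str(x)
--     if len(s) % 2 != 0:
--         return 0
--     def diff(t):
--         if not t:
--             return 0
--         return int(t[0]) - int(t[-1]) + diff(t[1:-1])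
--     return 1 if diff(s) == 0 else 0
-- ===== Notes on version B (the rewrite author's own statement) =====
-- stated objective: alternative
-- what changed: Replaces the half-slice digit-sum comparison by a recursive two-pointer that pairs the outermost characters, adds int(first)-int(last), strips both ends and recurses, testing the accumulated difference against zero.
import Mathlib
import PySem

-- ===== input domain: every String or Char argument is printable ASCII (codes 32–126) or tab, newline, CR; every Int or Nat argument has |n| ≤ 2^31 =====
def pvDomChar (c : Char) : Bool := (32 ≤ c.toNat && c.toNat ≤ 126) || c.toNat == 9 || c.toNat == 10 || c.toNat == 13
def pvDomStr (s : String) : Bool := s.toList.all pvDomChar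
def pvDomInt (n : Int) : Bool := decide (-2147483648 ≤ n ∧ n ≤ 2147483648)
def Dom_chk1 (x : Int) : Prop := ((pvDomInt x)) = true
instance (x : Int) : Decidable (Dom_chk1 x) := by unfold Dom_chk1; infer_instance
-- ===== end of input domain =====

-- B keeps A's odd-length guard but checks the half sums by a recursive two-pointer
-- pairing outermost characters instead of two half-slice sums.

-- ===== PORT A =====
-- int(c) for a single character; .getD 0 only covers the non-digit case Pre_ excludes
def pvDigit (c : Char) : Int := (PySem.Int.ofChars? [c]).getD 0

def chk1 (x : Int) : Int :=
  let s := PySem.Int.toChars x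
  let n := s.length
  if n % 2 ≠ 0 then 0
  else
    let sumLeft := ((s.take (n / 2)).map pvDigit).sum
    let sumRight := ((s.drop (n / 2)).map pvDigit).sum
    if sumLeft = sumRight then 1 else 0

-- ===== PORT B =====
-- diff(t): int(t[0]) - int(t[-1]) + diff(t[1:-1])
def pvDiffB : List Char → Int
  | [] => 0
  | c :: cs => pvDigit c - pvDigit (cs.getLastD c) + pvDiffB cs.dropLast
termination_by l => l.length
decreasing_by simp [List.length_dropLast]

def chk1_alt (x : Int) : Int :=
  let s := PySem.Int.toChars x
  if s.length % 2 ≠ 0 then 0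
  else if pvDiffB s = 0 then 1 else 0

-- ===== PRECONDITION & SPEC =====
-- Pre_ excludes exactly the inputs where A raises ValueError: negative x whose str has
-- even length (the '-' character reaches int(c)).
def Pre_chk1 (x : Int) : Prop := 0 ≤ x ∨ (PySem.Int.toChars x).length % 2 = 1
instance (x : Int) : Decidable (Pre_chk1 x) := by unfold Pre_chk1; infer_instance
def pvWitness_chk1 : Int := (1230)

def Spec_chk1 (x : Int) (out : Int) : Prop := out = chk1_alt x
instance (x : Int) (out : Int) : Decidable (Spec_chk1 x out) := by unfold Spec_chk1; infer_instance

-- ===== CLAIM (what is proved, stated in full; the proofs are below) =====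
def Claim_equal_chk1 : Prop := ∀ (x : Int), Dom_chk1 x → Pre_chk1 x → Spec_chk1 x (chk1 x)

-- ===== LEMMAS AND PROOFS =====

-- the two-pointer recursion equals (sum of the first ⌊n/2⌋ digits) − (sum of the last ⌊n/2⌋ digits)
theorem pvDiffB_eq (l : List Char) :
    pvDiffB l = ((l.take (l.length / 2)).map pvDigit).sum
              - ((l.drop ((l.length + 1) / 2)).map pvDigit).sum := by
  induction l using pvDiffB.induct with
  | case1 => simp [pvDiffB]
  | case2 c cs ih =>
    rcases eq_or_ne cs [] with rfl | hne
    · simp [pvDiffB]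
    · obtain ⟨m, z, rfl⟩ : ∃ m z, cs = m ++ [z] :=
        ⟨cs.dropLast, cs.getLast hne, (List.dropLast_append_getLast hne).symm⟩
      rw [pvDiffB]
      simp only [List.dropLast_concat] at ih
      have hlast : (m ++ [z]).getLastD c = z := by simp
      have hdl : (m ++ [z]).dropLast = m := by simp
      have hlen : (c :: (m ++ [z])).length = m.length + 2 := by simp
      rw [hlast, hdl, ih, hlen]
      have h1 : (m.length + 2) / 2 = m.length / 2 + 1 := by omega
      have h2 : (m.length + 2 + 1) / 2 = (m.length + 1) / 2 + 1 := by omega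
      rw [h1, h2]
      have ht : (c :: (m ++ [z])).take (m.length / 2 + 1)
              = c :: (m.take (m.length / 2)) := by
        simp [List.take_append_of_le_length (by omega : m.length / 2 ≤ m.length)]
      have hd : (c :: (m ++ [z])).drop ((m.length + 1) / 2 + 1)
              = m.drop ((m.length + 1) / 2) ++ [z] := by
        simp [List.drop_append_of_le_length (by omega : (m.length + 1) / 2 ≤ m.length)]
      rw [ht, hd]
      simp only [List.map_cons, List.sum_cons, List.map_append, List.sum_append,
        List.map_cons, List.sum_cons, List.map_nil, List.sum_nil]
      ring

-- ===== VERDICT (by name: the statement is the Claim_ definition above) =====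
theorem chk1_spec : Claim_equal_chk1 := by
  intro x _ _
  unfold Spec_chk1 chk1 chk1_alt
  simp only
  set s := PySem.Int.toChars x with hs
  by_cases hodd : s.length % 2 ≠ 0
  · simp [hodd]
  · simp only [hodd, if_false]
    rw [pvDiffB_eq]
    have h12 : (s.length + 1) / 2 = s.length / 2 := by omega
    rw [h12]
    set L := ((s.take (s.length / 2)).map pvDigit).sum
    set R := ((s.drop (s.length / 2)).map pvDigit).sum
    by_cases hlr : L = R
    · simp [hlr]
    · have hne : ¬ (L - R = 0) := by omega
      simp [hlr, hne]
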